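-- pv_equiv track=rewrite | github.com/XZhang00/QSTR | Evaluation-metrics/utils.py | deleaf
-- ===== SOURCE A (Python) =====
-- def deleaf(tree):
--     def is_paren(tok):
--         return tok == ")" or tok == "("
--
--     nonleaves = ''
--     for w in tree.replace('\n', '').split():
--         w = w.replace('(', '( ').replace(')', ' )')
--         nonleaves += w + ' '
--     arr = nonleaves.split()
--     for n, i in enumerate(arr):
--         if n + 1 < len(arr):
--             tok1 = arr[n]
--             tok2 = arr[n + 1]
--             if not is_paren(tok1) and not is_paren(tok2):
--                 arr[n + 1] = ""
--
--     nonleaves = " ".join(arr).split()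
--     return " ".join(nonleaves)
-- ===== SOURCE B (Python) =====
-- def deleaf(tree):
--     # Run-skipping scan: keep every paren; for each maximal run of word tokens
--     # keep only its first token and jump the cursor past the rest of the run.
--     tokens = tree.replace('\n', '').replace('(', '( ').replace(')', ' )').split()
--     out = []
--     i = 0
--     n = len(tokens)
--     while i < n:
--         t = tokens[i]
--         out.append(t)
--         i += 1
--         if t != '(' and t != ')':
--             while i < n and tokens[i] != '(' and tokens[i] != ')':
--                 i += 1
--     return ' '.join(out)
-- ===== Notes on version B (the rewrite author's own statement) =====
-- stated objective: alternative
-- what changed: A's two-phase mark-then-sweep (blank each leaf token in place via an index loop over the mutated list, then re-join and re-split to delete the blanks) is replaced by a run-skipping cursor scan: keep every paren token, and for each maximal run of non-paren tokens emit only its first token and jump the cursor past the rest of the run, so no blanking or re-splitting happens.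
import Mathlib
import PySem

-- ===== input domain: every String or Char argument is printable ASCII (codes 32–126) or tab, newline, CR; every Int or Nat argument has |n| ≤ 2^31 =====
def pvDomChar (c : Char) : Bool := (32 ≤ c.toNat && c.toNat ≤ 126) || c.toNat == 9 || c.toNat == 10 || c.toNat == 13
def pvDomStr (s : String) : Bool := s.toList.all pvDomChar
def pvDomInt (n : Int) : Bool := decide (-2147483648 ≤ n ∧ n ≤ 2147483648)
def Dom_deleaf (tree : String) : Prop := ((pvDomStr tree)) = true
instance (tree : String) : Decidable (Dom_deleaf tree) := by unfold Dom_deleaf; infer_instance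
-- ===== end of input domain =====

-- B replaces A's mark-then-sweep (blank leaf tokens in place, then re-join/re-split)
-- with a run-skipping cursor scan that keeps each paren and only the first token of
-- each maximal word run (objective: alternative, same cost).

-- ===== PORT A =====
-- A's inner helper is_paren
def pvIsParen (tok : String) : Bool := tok == ")" || tok == "("

def deleaf (tree : String) : String :=
  -- nonleaves = ''; for w in tree.replace('\n','').split(): nonleaves += w.replace('(','( ').replace(')',' )') + ' '
  let nonleaves := (PySem.Str.split₀ (PySem.Str.replace tree "\n" "")).foldl
    (fun acc w => acc ++ PySem.Str.replace (PySem.Str.replace w "(" "( ") ")" " )" ++ " ") ""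
  let arr := PySem.Str.split₀ nonleaves
  -- for n, i in enumerate(arr): blanking never changes len(arr), so the live iteration
  -- visits exactly the indices 0 .. len(arr)-1; arr[n] / arr[n+1] are in range (guard), so getD is exact
  let arr := (List.range arr.length).foldl
    (fun arr n =>
      if n + 1 < arr.length then
        let tok1 := arr.getD n ""
        let tok2 := arr.getD (n + 1) ""
        if !pvIsParen tok1 && !pvIsParen tok2 then arr.set (n + 1) "" else arr
      else arr) arr
  PySem.Str.join " " (PySem.Str.split₀ (PySem.Str.join " " arr))

-- ===== PORT B =====
-- Source B's outer while over the cursor, as structural recursion on the remaining tokens;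
-- the inner skip-while becomes dropWhile over the same run
def pvStrip : List String → List String
  | [] => []
  | t :: rest =>
    if t == "(" || t == ")" then t :: pvStrip rest
    else t :: pvStrip (rest.dropWhile (fun x => !(x == "(" || x == ")")))
termination_by l => l.length
decreasing_by
  · simp
  · exact Nat.lt_succ_of_le (List.length_dropWhile_le (fun x => !(x == "(" || x == ")")) rest)

def deleaf_alt (tree : String) : String :=
  let tokens := PySem.Str.split₀
    (PySem.Str.replace (PySem.Str.replace (PySem.Str.replace tree "\n" "") "(" "( ") ")" " )")
  PySem.Str.join " " (pvStrip tokens)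

-- ===== PRECONDITION & SPEC =====
def Spec_deleaf (tree : String) (out : String) : Prop := out = deleaf_alt tree
instance (tree : String) (out : String) : Decidable (Spec_deleaf tree out) := by unfold Spec_deleaf; infer_instance

-- ===== CLAIM (what is proved, stated in full; the proofs are below) =====
def Claim_equal_deleaf : Prop := ∀ (tree : String), Dom_deleaf tree → Spec_deleaf tree (deleaf tree)

-- ===== LEMMAS AND PROOFS =====

-- single-character replace is a flatMap
theorem pvReplaceGo_char (o : Char) (new : List Char) :
    ∀ (l : List Char) (fuel : Nat) (acc : List Char), l.length ≤ fuel →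
      PySem.Chars.replace.go [o] new fuel l acc
        = acc.reverse ++ l.flatMap (fun c => if c = o then new else [c]) := by
  intro l
  induction l with
  | nil =>
    intro fuel acc _
    cases fuel <;> rw [PySem.Chars.replace.go] <;> simp
  | cons c t ih =>
    intro fuel acc hf
    cases fuel with
    | zero => simp at hf
    | succ fuel =>
      rw [PySem.Chars.replace.go]
      by_cases hc : c = o
      · subst hc
        simp only [List.isPrefixOf, Bool.and_true, beq_self_eq_true,
          if_pos, List.length_cons, List.drop_succ_cons, List.drop_zero, List.length_nil]
        rw [ih fuel _ (by simpa using hf)]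
        simp
      · rw [if_neg (by simp [List.isPrefixOf, hc, Ne.symm])]
        rw [ih fuel _ (by simpa using hf)]
        simp [hc]

theorem pvReplace_char (s : List Char) (o : Char) (new : List Char) :
    PySem.Chars.replace s [o] new = s.flatMap (fun c => if c = o then new else [c]) := by
  rw [PySem.Chars.replace]
  simp [pvReplaceGo_char o new s s.length [] le_rfl]

-- split₀.go: accumulator comes out front
theorem pvGo_acc : ∀ (l cur : List Char) (acc : List (List Char)),
    PySem.Chars.split₀.go l cur acc = acc.reverse ++ PySem.Chars.split₀.go l cur [] := by
  intro l
  induction l with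
  | nil =>
    intro cur acc
    rw [PySem.Chars.split₀.go, PySem.Chars.split₀.go]
    by_cases h : cur.isEmpty <;> simp [h]
  | cons c t ih =>
    intro cur acc
    rw [PySem.Chars.split₀.go]
    conv_rhs => rw [PySem.Chars.split₀.go]
    by_cases hs : PySem.Chars.isspace c
    · by_cases h : cur.isEmpty
      · simp only [hs, h, if_pos]
        exact ih [] acc
      · simp only [hs, h, if_pos, Bool.false_eq_true]
        rw [ih [] (cur.reverse :: acc), ih [] [cur.reverse]]
        simp
    · simp only [hs, Bool.false_eq_true, if_false]
      rw [ih (c :: cur) acc]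

-- split₀ of a run of non-space characters
theorem pvGo_nonspace : ∀ (l cur : List Char), (∀ c ∈ l, PySem.Chars.isspace c = false) →
    PySem.Chars.split₀.go l cur [] =
      if cur.reverse ++ l = [] then [] else [cur.reverse ++ l] := by
  intro l
  induction l with
  | nil =>
    intro cur _
    rw [PySem.Chars.split₀.go]
    by_cases h : cur.isEmpty <;> simp_all [List.isEmpty_iff]
  | cons c t ih =>
    intro cur h
    rw [PySem.Chars.split₀.go]
    have hc : PySem.Chars.isspace c = false := h c (by simp)
    simp only [hc, Bool.false_eq_true, if_false]
    rw [ih (c :: cur) (fun d hd => h d (by simp [hd]))]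
    simp

theorem pvSplit_nonspace (l : List Char) (h : ∀ c ∈ l, PySem.Chars.isspace c = false) :
    PySem.Chars.split₀ l = if l = [] then [] else [l] := by
  rw [PySem.Chars.split₀, pvGo_nonspace l [] h]
  simp

-- a leading space is dropped
theorem pvSplit_cons_space (sp : Char) (x : List Char) (h : PySem.Chars.isspace sp = true) :
    PySem.Chars.split₀ (sp :: x) = PySem.Chars.split₀ x := by
  rw [PySem.Chars.split₀, PySem.Chars.split₀, PySem.Chars.split₀.go]
  simp [h]

-- split₀ splits at an inner space
theorem pvSplit_append (sp : Char) (h : PySem.Chars.isspace sp = true) (b : List Char) :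
    ∀ (a cur : List Char) (acc : List (List Char)),
      PySem.Chars.split₀.go (a ++ sp :: b) cur acc
        = PySem.Chars.split₀.go a cur acc ++ PySem.Chars.split₀.go b [] [] := by
  intro a
  induction a with
  | nil =>
    intro cur acc
    simp only [List.nil_append]
    conv_lhs => rw [PySem.Chars.split₀.go]
    conv_rhs => rw [PySem.Chars.split₀.go]
    by_cases hc : cur.isEmpty <;>
      simp [h, hc, pvGo_acc b [] acc, pvGo_acc b [] (cur.reverse :: acc)]
  | cons c t ih =>
    intro cur acc
    simp only [List.cons_append]
    rw [PySem.Chars.split₀.go]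
    conv_rhs => rw [PySem.Chars.split₀.go]
    by_cases hs : PySem.Chars.isspace c
    · by_cases hc : cur.isEmpty
      · simp only [hs, hc, if_pos]
        exact ih [] acc
      · simp only [hs, hc, if_pos, Bool.false_eq_true]
        rw [if_neg (by simp_all), if_neg (by simp_all)]
        exact ih [] (cur.reverse :: acc)
    · simp only [hs, Bool.false_eq_true, if_false]
      exact ih (c :: cur) acc

theorem pvSplit_append' (a b : List Char) (sp : Char) (h : PySem.Chars.isspace sp = true) :
    PySem.Chars.split₀ (a ++ sp :: b) = PySem.Chars.split₀ a ++ PySem.Chars.split₀ b := by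
  rw [PySem.Chars.split₀, PySem.Chars.split₀, PySem.Chars.split₀, pvSplit_append sp h b a [] []]

-- every word produced by split₀ is nonempty and space-free
theorem pvGo_words : ∀ (l cur : List Char) (acc : List (List Char)),
    (∀ a ∈ acc, a ≠ [] ∧ ∀ c ∈ a, PySem.Chars.isspace c = false) →
    (∀ c ∈ cur, PySem.Chars.isspace c = false) →
    ∀ w ∈ PySem.Chars.split₀.go l cur acc, w ≠ [] ∧ ∀ c ∈ w, PySem.Chars.isspace c = false := by
  intro l
  induction l with
  | nil =>
    intro cur acc hacc hcur
    rw [PySem.Chars.split₀.go]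
    by_cases hc : cur.isEmpty
    · simp only [hc, if_pos]
      intro w hw
      exact hacc w (by simpa using hw)
    · simp only [hc, Bool.false_eq_true, if_false]
      intro w hw
      rcases (by simpa using hw : w ∈ acc ∨ w = cur.reverse) with h1 | h1
      · exact hacc w h1
      · subst h1
        refine ⟨by simpa [List.isEmpty_iff] using hc, ?_⟩
        intro c hcm
        exact hcur c (by simpa using hcm)
  | cons c t ih =>
    intro cur acc hacc hcur
    rw [PySem.Chars.split₀.go]
    by_cases hs : PySem.Chars.isspace c
    · by_cases hc : cur.isEmpty
      · simp only [hs, hc, if_pos]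
        exact ih [] acc hacc (by simp)
      · simp only [hs, hc, if_pos, Bool.false_eq_true, if_false]
        refine ih [] (cur.reverse :: acc) ?_ (by simp)
        intro a ha
        rcases List.mem_cons.mp ha with h1 | h1
        · subst h1
          refine ⟨by simpa [List.isEmpty_iff] using hc, ?_⟩
          intro d hd
          exact hcur d (by simpa using hd)
        · exact hacc a h1
    · simp only [hs, Bool.false_eq_true, if_false]
      refine ih (c :: cur) acc hacc ?_
      intro d hd
      rcases List.mem_cons.mp hd with h1 | h1
      · subst h1; simpa using hs
      · exact hcur d h1

theorem pvSplit_words (l : List Char) :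
    ∀ w ∈ PySem.Chars.split₀ l, w ≠ [] ∧ ∀ c ∈ w, PySem.Chars.isspace c = false := by
  rw [PySem.Chars.split₀]
  exact pvGo_words l [] [] (by simp) (by simp)

-- first word of a non-space-headed list
theorem pvSplit_head (c : Char) (t : List Char) (h : PySem.Chars.isspace c = false) :
    PySem.Chars.split₀ (c :: t)
      = (c :: t.takeWhile (fun d => !PySem.Chars.isspace d))
        :: PySem.Chars.split₀ (t.dropWhile (fun d => !PySem.Chars.isspace d)) := by
  have hdecomp : c :: t = (c :: t.takeWhile (fun d => !PySem.Chars.isspace d))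
      ++ t.dropWhile (fun d => !PySem.Chars.isspace d) := by
    simp [List.takeWhile_append_dropWhile]
  have hw : ∀ d ∈ c :: t.takeWhile (fun d => !PySem.Chars.isspace d),
      PySem.Chars.isspace d = false := by
    intro d hd
    rcases List.mem_cons.mp hd with h1 | h1
    · subst h1; exact h
    · simpa using List.mem_takeWhile_imp h1
  cases hr : t.dropWhile (fun d => !PySem.Chars.isspace d) with
  | nil =>
    conv_lhs => rw [hdecomp, hr]
    rw [List.append_nil, pvSplit_nonspace _ hw]
    simp [PySem.Chars.split₀, PySem.Chars.split₀.go]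
  | cons sp r' =>
    have hsp : PySem.Chars.isspace sp = true := by
      have := List.head_dropWhile_not (fun d => !PySem.Chars.isspace d) (l := t) (by simp [hr])
      simpa [hr] using this
    conv_lhs => rw [hdecomp, hr]
    rw [pvSplit_append' _ _ _ hsp, pvSplit_nonspace _ hw,
      pvSplit_cons_space _ _ hsp]
    simp

-- split₀ distributes over a char-wise substitution preserving spaces
theorem pvSplit_flatMap (h : Char → List Char)
    (hsp : ∀ c, PySem.Chars.isspace c = true → h c = [c]) :
    ∀ (s : List Char), PySem.Chars.split₀ (s.flatMap h)
      = (PySem.Chars.split₀ s).flatMap (fun w => PySem.Chars.split₀ (w.flatMap h)) := by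
  intro s
  induction hn : s.length using Nat.strong_induction_on generalizing s with
  | _ n ih =>
  subst hn
  match s with
  | [] => simp [PySem.Chars.split₀, PySem.Chars.split₀.go]
  | c :: t =>
    by_cases hs : PySem.Chars.isspace c
    · rw [List.flatMap_cons, hsp c hs, List.singleton_append,
        pvSplit_cons_space c _ hs, pvSplit_cons_space c t hs]
      exact ih t.length (by simp) t rfl
    · have hsf : PySem.Chars.isspace c = false := by simpa using hs
      rw [pvSplit_head c t hsf]
      set w := c :: t.takeWhile (fun d => !PySem.Chars.isspace d) with hwdef
      set r := t.dropWhile (fun d => !PySem.Chars.isspace d) with hrdef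
      have hct : c :: t = w ++ r := by
        simp [hwdef, hrdef, List.takeWhile_append_dropWhile]
      rw [List.flatMap_cons]
      cases hr : r with
      | nil =>
        have hw2 : w = c :: t := by
          have := hct
          rw [hr, List.append_nil] at this
          exact this.symm
        have hnil : PySem.Chars.split₀ ([] : List Char) = [] := by
          simp [PySem.Chars.split₀, PySem.Chars.split₀.go]
        rw [hnil]
        simp [hw2]
      | cons sp r' =>
        have hsp' : PySem.Chars.isspace sp = true := by
          have := List.head_dropWhile_not (fun d => !PySem.Chars.isspace d) (l := t)
            (by simp [← hrdef, hr])
          simpa [← hrdef, hr] using this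
        have htw : h c ++ t.flatMap h = w.flatMap h ++ sp :: r'.flatMap h := by
          have : (c :: t).flatMap h = (w ++ sp :: r').flatMap h := by
            rw [hct, hr]
          simpa [List.flatMap_append, hsp sp hsp'] using this
        rw [htw, pvSplit_append' _ _ sp hsp', pvSplit_cons_space sp r' hsp']
        rw [List.flatMap_cons]
        congr 1
        have hlen : r'.length < (c :: t).length := by
          have : r.length ≤ t.length := List.length_dropWhile_le _ t
          rw [hr] at this
          simp only [List.length_cons] at this ⊢
          omega
        exact ih r'.length hlen r' rfl

-- split₀ of a space-join of space-free pieces drops exactly the empty pieces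
theorem pvSplit_join (parts : List (List Char))
    (h : ∀ p ∈ parts, ∀ c ∈ p, PySem.Chars.isspace c = false) :
    PySem.Chars.split₀ (PySem.Chars.join [' '] parts) = parts.filter (· ≠ []) := by
  induction parts with
  | nil => simp [PySem.Chars.join, List.intercalate, PySem.Chars.split₀, PySem.Chars.split₀.go]
  | cons p rest ih =>
    cases rest with
    | nil =>
      have : PySem.Chars.join [' '] [p] = p := by
        simp [PySem.Chars.join, List.intercalate]
      rw [this, pvSplit_nonspace p (h p (by simp))]
      by_cases hp : p = [] <;> simp [hp]
    | cons q rest' =>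
      have hstep : PySem.Chars.join [' '] (p :: q :: rest')
          = p ++ ' ' :: PySem.Chars.join [' '] (q :: rest') := by
        simp [PySem.Chars.join, List.intercalate]
      rw [hstep, pvSplit_append' _ _ ' ' (by decide),
        pvSplit_nonspace p (h p (by simp)),
        ih (fun x hx c hc => h x (by simp [hx]) c hc)]
      by_cases hp : p = [] <;> simp [hp]

-- character-wise effect of the three replaces
def pvG1 (c : Char) : List Char := if c = '(' then ['(', ' '] else [c]
def pvG2 (c : Char) : List Char := if c = ')' then [' ', ')'] else [c]
def pvG (c : Char) : List Char := (pvG1 c).flatMap pvG2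

theorem pvG_space (c : Char) (hc : PySem.Chars.isspace c = true) : pvG c = [c] := by
  have h1 : c ≠ '(' := by rintro rfl; simp [PySem.Chars.isspace] at hc
  have h2 : c ≠ ')' := by rintro rfl; simp [PySem.Chars.isspace] at hc
  simp [pvG, pvG1, pvG2, h1, h2]

-- split₀ of a flatten of pieces each followed by one space
theorem pvSplit_wordjoin (fw : List Char → List Char) :
    ∀ (ws : List (List Char)),
      PySem.Chars.split₀ (ws.flatMap (fun w => fw w ++ [' ']))
        = ws.flatMap (fun w => PySem.Chars.split₀ (fw w)) := by
  intro ws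
  induction ws with
  | nil => simp [PySem.Chars.split₀, PySem.Chars.split₀.go]
  | cons w rest ih =>
    rw [List.flatMap_cons, List.append_assoc, List.singleton_append,
      pvSplit_append' _ _ ' ' (by decide), ih]
    simp

-- A's string-building foldl, on the char level
theorem pvFoldl_toList (f : String → String) (ws : List String) :
    ∀ (acc : String),
      (ws.foldl (fun acc w => acc ++ f w ++ " ") acc).toList
        = acc.toList ++ ws.flatMap (fun w => (f w).toList ++ [' ']) := by
  induction ws with
  | nil => simp
  | cons w rest ih =>
    intro acc
    rw [List.foldl_cons, ih]
    simp

-- ===== A's blanking loop, recursively =====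
def pvBlanks (p : String) : List String → List String
  | [] => []
  | t :: r =>
    (if !pvIsParen p && !pvIsParen t then "" else t)
      :: pvBlanks (if !pvIsParen p && !pvIsParen t then "" else t) r

def pvBlanksTop : List String → List String
  | [] => []
  | t :: r => t :: pvBlanks t r

def pvStep (arr : List String) (n : Nat) : List String :=
  if n + 1 < arr.length then
    if !pvIsParen (arr.getD n "") && !pvIsParen (arr.getD (n + 1) "") then
      arr.set (n + 1) "" else arr
  else arr

theorem pvBlanks_length (r : List String) : ∀ p, (pvBlanks p r).length = r.length := by
  induction r with
  | nil => simp [pvBlanks]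
  | cons t r ih => intro p; simp [pvBlanks, ih]

theorem pvBlanks_mem (r : List String) : ∀ p x, x ∈ pvBlanks p r → x = "" ∨ x ∈ r := by
  induction r with
  | nil => simp [pvBlanks]
  | cons t r ih =>
    intro p x hx
    rw [pvBlanks] at hx
    rcases List.mem_cons.mp hx with h1 | h1
    · by_cases hc : !pvIsParen p && !pvIsParen t
      · simp [hc] at h1; exact Or.inl h1
      · simp [hc] at h1; exact Or.inr (by simp [h1])
    · rcases ih _ x h1 with h2 | h2
      · exact Or.inl h2
      · exact Or.inr (by simp [h2])

theorem pvFold_blanks : ∀ (suf pre : List String) (p : String),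
    (List.range' pre.length suf.length 1).foldl pvStep (pre ++ p :: suf)
      = pre ++ p :: pvBlanks p suf := by
  intro suf
  induction suf with
  | nil => intro pre p; simp [pvBlanks]
  | cons t r ih =>
    intro pre p
    have hrange : List.range' pre.length (t :: r).length 1
        = pre.length :: List.range' (pre.length + 1) r.length 1 := by
      simp [List.range'_succ]
    rw [hrange, List.foldl_cons]
    have hstep : pvStep (pre ++ p :: t :: r) pre.length
        = pre ++ p :: (if !pvIsParen p && !pvIsParen t then "" else t) :: r := by
      rw [pvStep]
      have hlen : pre.length + 1 < (pre ++ p :: t :: r).length := by simp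
      rw [if_pos hlen]
      have h1 : (pre ++ p :: t :: r).getD pre.length "" = p := by
        rw [List.getD_append_right _ _ _ _ le_rfl]
        simp
      have h2 : (pre ++ p :: t :: r).getD (pre.length + 1) "" = t := by
        rw [List.getD_append_right _ _ _ _ (by omega)]
        simp
      rw [h1, h2]
      by_cases hc : !pvIsParen p && !pvIsParen t
      · rw [if_pos hc, List.set_eq_take_append_cons_drop, if_pos hlen]
        rw [if_pos hc]
        have ht : List.take (pre.length + 1) (pre ++ p :: t :: r) = pre ++ [p] := by
          rw [List.take_append]
          simp
        have hd : List.drop (pre.length + 2) (pre ++ p :: t :: r) = r := by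
          rw [show pre.length + 2 = (pre ++ [p, t]).length by simp]
          rw [show pre ++ p :: t :: r = (pre ++ [p, t]) ++ r by simp]
          exact List.drop_left
        rw [ht, hd]
        simp
      · rw [if_neg hc, if_neg hc]
    rw [hstep]
    have := ih (pre ++ [p]) (if !pvIsParen p && !pvIsParen t then "" else t)
    simp only [List.length_append, List.length_cons, List.length_nil, Nat.zero_add,
      List.append_assoc, List.cons_append, List.nil_append] at this ⊢
    rw [pvBlanks]
    exact this

theorem pvMark_eq (ts : List String) :
    (List.range ts.length).foldl pvStep ts = pvBlanksTop ts := by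
  cases ts with
  | nil => simp [pvBlanksTop]
  | cons t r =>
    rw [List.range_eq_range']
    have : List.range' 0 (t :: r).length 1
        = List.range' 0 r.length 1 ++ [r.length] := by
      simpa using List.range'_concat (step := 1) (s := 0) (n := r.length)
    rw [this, List.foldl_append]
    have h1 : (List.range' 0 r.length 1).foldl pvStep (t :: r) = t :: pvBlanks t r := by
      simpa using pvFold_blanks r [] t
    rw [h1]
    simp only [List.foldl_cons, List.foldl_nil]
    rw [pvStep, if_neg (by simp [pvBlanks_length])]
    rfl

-- Source B's skip condition agrees with A's is_paren
theorem pvCond_eq (x : String) : (x == "(" || x == ")") = pvIsParen x := by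
  rw [pvIsParen]
  cases h1 : x == "(" <;> cases h2 : x == ")" <;> rfl

-- the blanked list, with empties dropped, is B's run-skipping result:
-- after a kept paren a fresh strip starts; after a kept word the rest of the word run is dropped
theorem pvFilter_strip (r : List String) : ∀ (p : String), (∀ t ∈ r, t ≠ "") →
    (pvBlanks p r).filter (· ≠ "")
      = if pvIsParen p then pvStrip r
        else pvStrip (r.dropWhile (fun x => !(x == "(" || x == ")"))) := by
  induction r with
  | nil => intro p _; simp [pvBlanks, pvStrip]
  | cons t r ih =>
    intro p hne
    have htne : t ≠ "" := hne t (by simp)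
    have hr' : ∀ x ∈ r, x ≠ "" := fun x hx => hne x (by simp [hx])
    rw [pvBlanks]
    by_cases hp : pvIsParen p
    · have hc : ¬(!pvIsParen p && !pvIsParen t) := by simp [hp]
      rw [if_neg hc, List.filter_cons_of_pos (by simpa using htne), ih t hr', if_pos hp]
      rw [pvStrip]
      simp only [pvCond_eq]
      by_cases ht : pvIsParen t <;> simp [ht]
    · by_cases ht : pvIsParen t
      · have hc : ¬(!pvIsParen p && !pvIsParen t) := by simp [ht]
        rw [if_neg hc, List.filter_cons_of_pos (by simpa using htne), ih t hr',
          if_pos ht, if_neg hp]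
        simp only [pvCond_eq]
        rw [List.dropWhile_cons_of_neg (by simp [ht]), pvStrip]
        simp only [pvCond_eq]
        rw [if_pos ht]
      · have hc : (!pvIsParen p && !pvIsParen t) = true := by
          simp [hp, ht]
        rw [if_pos hc, List.filter_cons_of_neg (by simp), ih "" hr',
          if_neg (by decide), if_neg hp]
        rw [List.dropWhile_cons_of_pos (by simp [pvCond_eq, ht])]

theorem pvFilter_strip_top (ts : List String) (hne : ∀ t ∈ ts, t ≠ "") :
    (pvBlanksTop ts).filter (· ≠ "") = pvStrip ts := by
  cases ts with
  | nil => simp [pvBlanksTop, pvStrip]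
  | cons t r =>
    rw [pvBlanksTop, List.filter_cons_of_pos (by simpa using hne t (by simp))]
    rw [pvFilter_strip r t (fun x hx => hne x (by simp [hx]))]
    rw [pvStrip]
    simp only [pvCond_eq]
    by_cases ht : pvIsParen t <;> simp [ht]

-- Str-level: split₀ of a space-join of space-free strings keeps exactly the nonempty ones
theorem pvStrSplit_join (parts : List String)
    (h : ∀ p ∈ parts, ∀ c ∈ p.toList, PySem.Chars.isspace c = false) :
    PySem.Str.split₀ (PySem.Str.join " " parts) = parts.filter (· ≠ "") := by
  have hinj : Function.Injective String.toList := fun a b hab => String.toList_inj.mp hab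
  apply List.map_injective_iff.mpr hinj
  rw [PySem.Str.split₀_map_toList, PySem.Str.toList_join]
  have hsep : (" " : String).toList = [' '] := by decide
  rw [hsep, pvSplit_join (parts.map String.toList)
    (by intro p hp c hc
        rcases List.mem_map.mp hp with ⟨q, hq, rfl⟩
        exact h q hq c hc)]
  rw [List.filter_map]
  congr 1
  apply List.filter_congr
  intro x _
  simp [Function.comp, String.toList_eq_nil_iff]

theorem pvTokens_eq (tree : String) :
    PySem.Str.split₀
      ((PySem.Str.split₀ (PySem.Str.replace tree "\n" "")).foldl
        (fun acc w => acc ++ PySem.Str.replace (PySem.Str.replace w "(" "( ") ")" " )" ++ " ") "")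
    = PySem.Str.split₀
        (PySem.Str.replace (PySem.Str.replace (PySem.Str.replace tree "\n" "") "(" "( ") ")" " )") := by
  have hinj : Function.Injective String.toList := fun a b hab => String.toList_inj.mp hab
  apply List.map_injective_iff.mpr hinj
  rw [PySem.Str.split₀_map_toList, PySem.Str.split₀_map_toList]
  have hopen : ("(" : String).toList = ['('] := by decide
  have hclose : (")" : String).toList = [')'] := by decide
  have hopen2 : ("( " : String).toList = ['(', ' '] := by decide
  have hclose2 : (" )" : String).toList = [' ', ')'] := by decide
  have hf : ∀ w : String,
      (PySem.Str.replace (PySem.Str.replace w "(" "( ") ")" " )").toList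
        = w.toList.flatMap pvG := by
    intro w
    rw [PySem.Str.toList_replace, PySem.Str.toList_replace, hopen, hclose, hopen2, hclose2,
      pvReplace_char, pvReplace_char, List.flatMap_assoc]
    rfl
  rw [hf]
  set s1 := PySem.Str.replace tree "\n" "" with hs1
  rw [pvFoldl_toList (fun w => PySem.Str.replace (PySem.Str.replace w "(" "( ") ")" " )")
    (PySem.Str.split₀ s1) ""]
  simp only [hf]
  have hA : ((PySem.Str.split₀ s1).flatMap (fun w => w.toList.flatMap pvG ++ [' ']))
      = ((PySem.Str.split₀ s1).map String.toList).flatMap (fun wt => wt.flatMap pvG ++ [' ']) := by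
    rw [List.flatMap_map]
  rw [show ("" : String).toList = [] by decide, List.nil_append, hA,
    pvSplit_wordjoin (fun wt => wt.flatMap pvG), PySem.Str.split₀_map_toList,
    pvSplit_flatMap pvG pvG_space]

-- ===== VERDICT (by name: the statement is the Claim_ definition above) =====
theorem deleaf_spec : Claim_equal_deleaf := by
  intro tree _
  unfold Spec_deleaf
  show deleaf tree = deleaf_alt tree
  simp only [deleaf, deleaf_alt]
  rw [pvTokens_eq tree]
  set tokens := PySem.Str.split₀
    (PySem.Str.replace (PySem.Str.replace (PySem.Str.replace tree "\n" "") "(" "( ") ")" " )")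
    with htokens
  have hprops : ∀ t ∈ tokens, t ≠ "" ∧ ∀ c ∈ t.toList, PySem.Chars.isspace c = false := by
    intro t ht
    have hmem : t.toList ∈ (tokens.map String.toList) := List.mem_map_of_mem ht
    rw [htokens, PySem.Str.split₀_map_toList] at hmem
    have := pvSplit_words _ _ hmem
    refine ⟨?_, this.2⟩
    intro he
    exact this.1 (by simp [he])
  have hne : ∀ t ∈ tokens, t ≠ "" := fun t ht => (hprops t ht).1
  have hstepeq : (fun (arr : List String) (n : Nat) =>
      if n + 1 < arr.length then
        if !pvIsParen (arr.getD n "") && !pvIsParen (arr.getD (n + 1) "") then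
          arr.set (n + 1) "" else arr
      else arr) = pvStep := by
    funext arr n
    rw [pvStep]
  rw [hstepeq, pvMark_eq tokens]
  rw [pvStrSplit_join (pvBlanksTop tokens)
    (by intro p hp c hc
        have : p = "" ∨ p ∈ tokens := by
          cases htk : tokens with
          | nil => rw [htk] at hp; simp [pvBlanksTop] at hp
          | cons t r =>
            rw [htk] at hp
            rcases List.mem_cons.mp hp with h1 | h1
            · exact Or.inr (by simp [h1])
            · rcases pvBlanks_mem r t p h1 with h2 | h2
              · exact Or.inl h2
              · exact Or.inr (by simp [h2])
        rcases this with h1 | h1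
        · subst h1; simp at hc
        · exact (hprops p h1).2 c hc)]
  rw [pvFilter_strip_top tokens hne]
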